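-- pv_equiv track=rewrite | github.com/hlsamuel00/probability-calculator | prob_calculator.py | _validate_experiment
-- ===== SOURCE A (Python) =====
-- from collections import defaultdict
--
-- def _validate_experiment(picked_balls: list[str], expected_balls: dict[str, int]) -> bool:
--     picked_ball_count = defaultdict(int)
--     for picked_ball_color in picked_balls:
--         picked_ball_count[picked_ball_color] += 1
--
--     for exp_ball_color, exp_ball_count in expected_balls.items():
--         if picked_ball_count[exp_ball_color] < exp_ball_count:
--             return False
--
--     return True
-- ===== SOURCE B (Python) =====
-- def _validate_experiment(picked_balls: list[str], expected_balls: dict[str, int]) -> bool: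
--     # Inverted traversal: consume picked balls one by one, decrementing the
--     # outstanding requirement of the matching color; succeed iff every
--     # requirement has been driven down to zero or below.
--     remaining = [[color, count] for color, count in expected_balls.items()]
--     for ball in picked_balls:
--         for entry in remaining:
--             if entry[0] == ball:
--                 entry[1] -= 1
--     return all(count <= 0 for _, count in remaining)
-- ===== Notes on version B (the rewrite author's own statement) =====
-- stated objective: alternative
-- what changed: Inverts the traversal: instead of building a frequency table of picked_balls and then scanning expected_balls against it, B walks picked_balls once, decrementing the outstanding requirement of each matching color in a requirements list, and finally checks that every requirement is <= 0.
import Mathlib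
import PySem

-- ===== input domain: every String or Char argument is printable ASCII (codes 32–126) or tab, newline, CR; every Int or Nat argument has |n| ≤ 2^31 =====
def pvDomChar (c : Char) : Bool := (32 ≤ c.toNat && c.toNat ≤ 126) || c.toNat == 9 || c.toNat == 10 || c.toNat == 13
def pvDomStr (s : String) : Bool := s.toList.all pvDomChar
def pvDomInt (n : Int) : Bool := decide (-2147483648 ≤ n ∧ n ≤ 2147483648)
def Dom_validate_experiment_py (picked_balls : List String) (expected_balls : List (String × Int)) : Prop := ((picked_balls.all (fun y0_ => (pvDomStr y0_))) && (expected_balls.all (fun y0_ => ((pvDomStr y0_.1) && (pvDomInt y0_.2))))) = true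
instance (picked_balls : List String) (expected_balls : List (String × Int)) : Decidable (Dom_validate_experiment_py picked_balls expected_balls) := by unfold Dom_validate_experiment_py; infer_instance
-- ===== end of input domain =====

-- B inverts A's traversal: it consumes picked_balls, decrementing a requirements
-- list, then checks all requirements are ≤ 0 (objective: alternative).

-- ===== PORT A =====
-- the second loop of A, with its early `return False`
def validateA_check (d : PySem.Dict String Int) : List (String × Int) → Bool
  | [] => true
  | (c, n) :: rest => if d.getD c 0 < n then false else validateA_check d rest

def validate_experiment_py (picked_balls : List String) (expected_balls : List (String × Int)) : Bool :=
  -- defaultdict(int): `d[x] += 1` is insert x (getD x 0 + 1); a missing key reads 0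
  let picked_ball_count := picked_balls.foldl (fun d x => d.insert x (d.getD x 0 + 1)) PySem.Dict.empty
  validateA_check picked_ball_count expected_balls

-- ===== PORT B =====
-- `entry[1] -= 1` on the matching entries of the requirements list (Python dict
-- items have distinct colors, so exactly the matching entry is decremented)
def validate_experiment_py_alt (picked_balls : List String) (expected_balls : List (String × Int)) : Bool :=
  let remaining := picked_balls.foldl
    (fun rem ball => rem.map (fun e => if e.1 == ball then (e.1, e.2 - 1) else e))
    expected_balls
  remaining.all (fun e => decide (e.2 ≤ 0))

-- ===== PRECONDITION & SPEC =====
def Spec_validate_experiment_py (picked_balls : List String) (expected_balls : List (String × Int)) (out : Bool) : Prop := out = validate_experiment_py_alt picked_balls expected_balls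
instance (picked_balls : List String) (expected_balls : List (String × Int)) (out : Bool) : Decidable (Spec_validate_experiment_py picked_balls expected_balls out) := by unfold Spec_validate_experiment_py; infer_instance

-- ===== CLAIM (what is proved, stated in full; the proofs are below) =====
def Claim_equal_validate_experiment_py : Prop := ∀ (picked_balls : List String) (expected_balls : List (String × Int)), Dom_validate_experiment_py picked_balls expected_balls → Spec_validate_experiment_py picked_balls expected_balls (validate_experiment_py picked_balls expected_balls)

-- ===== LEMMAS AND PROOFS =====

-- A's counter lookup is list.count
theorem validateA_check_counter (picked : List String) :
    ∀ (es : List (String × Int)),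
      validateA_check (picked.foldl (fun d x => d.insert x (d.getD x 0 + 1)) PySem.Dict.empty) es
        = es.all (fun p => decide ((picked.count p.1 : Int) ≥ p.2)) := by
  intro es
  induction es with
  | nil => rfl
  | cons hd tl ih =>
    obtain ⟨c, n⟩ := hd
    rcases lt_or_ge ((picked.count c : Int)) n with h | h
    · simp [validateA_check, PySem.Dict.getD_foldl_insert_add_one, PySem.Dict.getD_empty,
        h, not_le.mpr h]
    · simp [validateA_check, PySem.Dict.getD_foldl_insert_add_one, PySem.Dict.getD_empty,
        not_lt.mpr h, h, ih]

-- a fold of maps is a map of per-element folds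
theorem foldl_map_comm {α β : Type} (g : β → α → α) :
    ∀ (bs : List β) (es : List α),
      bs.foldl (fun rem b => rem.map (g b)) es = es.map (fun e => bs.foldl (fun e b => g b e) e) := by
  intro bs
  induction bs with
  | nil => intro es; simp
  | cons b rest ih =>
    intro es
    simp only [List.foldl_cons, ih, List.map_map]
    rfl

-- one entry, run through all of picked: its count gets subtracted
theorem dec_run (c : String) (n : Int) (picked : List String) :
    picked.foldl (fun (e : String × Int) b => if e.1 == b then (e.1, e.2 - 1) else e) (c, n)
      = (c, n - picked.count c) := by
  induction picked generalizing n with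
  | nil => simp
  | cons b rest ih =>
    rw [List.foldl_cons]
    by_cases h : c = b
    · subst h
      rw [if_pos (by simp), ih (n - 1), List.count_cons_self]
      push_cast
      ring_nf
    · rw [if_neg (by simp [h]), ih n, List.count_cons_of_ne (fun hh => h hh.symm)]


-- ===== VERDICT (by name: the statement is the Claim_ definition above) =====
theorem validate_experiment_py_spec : Claim_equal_validate_experiment_py := by
  intro picked expected _
  unfold Spec_validate_experiment_py validate_experiment_py validate_experiment_py_alt
  rw [validateA_check_counter, foldl_map_comm]
  simp only [List.all_map]
  congr 1
  funext e
  simp only [Function.comp_apply, dec_run e.1 e.2, ge_iff_le, decide_eq_decide]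
  omega
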